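-- pv_equiv track=rewrite | github.com/lordisfet/PuthonLWs | LW1/Ex2/main.py | sum_even_product_odd
-- ===== SOURCE A (Python) =====
-- def sum_even_product_odd(n):
--   sum_even = 0
--   product_odd = 1
--
--   for i in range(0, n + 1):
--     if i % 2 == 0:
--       sum_even += i
--     else:
--       product_odd *= i
--   return sum_even, product_odd
-- ===== SOURCE B (Python) =====
-- def sum_even_product_odd(n):
--   k = max(0, n // 2)
--   sum_even = k * (k + 1)
--   product_odd = 1
--   for i in range(1, n + 1, 2):
--     product_odd *= i
--   return sum_even, product_odd
-- ===== Notes on version B (the rewrite author's own statement) =====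
-- stated objective: alternative
-- what changed: Replaces A's single branching pass over range(0, n+1) by a closed form k*(k+1) (k = max(0, n//2)) for the even sum plus a direct product over the odd stride range(1, n+1, 2); the big-integer odd product dominates runtime, so overall cost is unchanged.
import Mathlib
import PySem

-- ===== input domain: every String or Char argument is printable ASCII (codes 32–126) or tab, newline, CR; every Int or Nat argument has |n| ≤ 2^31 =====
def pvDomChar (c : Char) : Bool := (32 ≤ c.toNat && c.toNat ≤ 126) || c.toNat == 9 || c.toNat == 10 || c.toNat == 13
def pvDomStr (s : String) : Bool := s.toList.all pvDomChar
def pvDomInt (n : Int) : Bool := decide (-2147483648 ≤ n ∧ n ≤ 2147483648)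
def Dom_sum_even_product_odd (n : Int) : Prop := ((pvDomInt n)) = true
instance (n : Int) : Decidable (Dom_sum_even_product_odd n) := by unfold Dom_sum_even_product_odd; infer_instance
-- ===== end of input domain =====

-- B replaces A's single branching pass by a closed form for the even sum plus a
-- direct product over the odd stride; same return value for every int n.

-- ===== PORT A =====
-- for i in range(0, n+1): if i % 2 == 0: sum_even += i else: product_odd *= i
def sum_even_product_odd (n : Int) : Int × Int :=
  (PySem.List.pyRange 0 (n + 1) 1).foldl
    (fun (st : Int × Int) i =>
      if PySem.Int.mod i 2 == 0 then (st.1 + i, st.2) else (st.1, st.2 * i))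
    (0, 1)

-- ===== PORT B =====
-- k = max(0, n//2); sum_even = k*(k+1); product_odd over range(1, n+1, 2)
def sum_even_product_odd_alt (n : Int) : Int × Int :=
  let k : Int := max 0 (PySem.Int.floordiv n 2)
  (k * (k + 1),
   (PySem.List.pyRange 1 (n + 1) 2).foldl (fun acc i => acc * i) 1)

-- ===== PRECONDITION & SPEC =====
def Spec_sum_even_product_odd (n : Int) (out : Int × Int) : Prop := out = sum_even_product_odd_alt n
instance (n : Int) (out : Int × Int) : Decidable (Spec_sum_even_product_odd n out) := by unfold Spec_sum_even_product_odd; infer_instance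

-- ===== CLAIM (what is proved, stated in full; the proofs are below) =====
def Claim_equal_sum_even_product_odd : Prop := ∀ (n : Int), Dom_sum_even_product_odd n → Spec_sum_even_product_odd n (sum_even_product_odd n)

-- ===== LEMMAS AND PROOFS =====

-- reference values by Nat recursion: pvSumE m = sum of evens in [0,m], pvOddProd m = product of odds in [1,m]
def pvSumE : Nat → Int
  | 0 => 0
  | m + 1 => if (m + 1) % 2 = 0 then pvSumE m + (m + 1) else pvSumE m

def pvOddProd : Nat → Int
  | 0 => 1
  | m + 1 => if (m + 1) % 2 = 0 then pvOddProd m else pvOddProd m * (m + 1)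

lemma pvMod2 (m : Nat) : PySem.Int.mod (m : Int) 2 = ((m % 2 : Nat) : Int) := by
  simp [PySem.Int.mod, Int.fmod_eq_emod]

lemma pvFdiv (m : Nat) : PySem.Int.floordiv (m : Int) 2 = ((m / 2 : Nat) : Int) := by
  simp [PySem.Int.floordiv, Int.fdiv_eq_ediv]

lemma A_eq (m : Nat) : sum_even_product_odd (m : Int) = (pvSumE m, pvOddProd m) := by
  induction m with
  | zero => decide
  | succ m ih =>
    unfold sum_even_product_odd at *
    rw [show ((m + 1 : Nat) : Int) + 1 = ((m : Int) + 1) + 1 by push_cast; ring,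
        PySem.List.pyRange_one_succ_right (by positivity)]
    rw [List.foldl_append, ih]
    have h2 : PySem.Int.mod ((m : Int) + 1) 2 = (((m + 1) % 2 : Nat) : Int) := by
      rw [show (m : Int) + 1 = ((m + 1 : Nat) : Int) by push_cast; ring]; exact pvMod2 _
    simp only [pvSumE, pvOddProd, List.foldl]
    rcases Nat.mod_two_eq_zero_or_one (m + 1) with h | h
    · rw [h] at h2
      rw [h2]
      simp only [Nat.cast_zero, BEq.rfl, if_true, if_pos h]
    · rw [h] at h2
      rw [h2]
      norm_num [h]

lemma range2_step (m : Nat) :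
    PySem.List.pyRange 1 ((m : Int) + 1 + 1) 2 =
      if (m + 1) % 2 = 0 then PySem.List.pyRange 1 ((m : Int) + 1) 2
      else PySem.List.pyRange 1 ((m : Int) + 1) 2 ++ [(m : Int) + 1] := by
  rw [PySem.List.pyRange_of_pos _ _ (by norm_num), PySem.List.pyRange_of_pos _ _ (by norm_num)]
  have e1 : (((m : Int) + 1 + 1 - 1 + 2 - 1) / 2) = (((m + 2) / 2 : Nat) : Int) := by
    rw [show ((m : Int) + 1 + 1 - 1 + 2 - 1) = ((m + 2 : Nat) : Int) by push_cast; ring,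
        show (2 : Int) = ((2 : Nat) : Int) by rfl, ← Int.natCast_div]
  have e2 : (((m : Int) + 1 - 1 + 2 - 1) / 2) = (((m + 1) / 2 : Nat) : Int) := by
    rw [show ((m : Int) + 1 - 1 + 2 - 1) = ((m + 1 : Nat) : Int) by push_cast; ring,
        show (2 : Int) = ((2 : Nat) : Int) by rfl, ← Int.natCast_div]
  have hL : (if (1 : Int) < (m : Int) + 1 + 1 then (((m : Int) + 1 + 1 - 1 + 2 - 1) / 2).toNat else 0)
      = (m + 2) / 2 := by rw [if_pos (by omega), e1, Int.toNat_natCast]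
  have hR : (if (1 : Int) < (m : Int) + 1 then (((m : Int) + 1 - 1 + 2 - 1) / 2).toNat else 0)
      = (m + 1) / 2 := by
    rcases Nat.eq_zero_or_pos m with rfl | hm
    · simp
    · rw [if_pos (by omega), e2, Int.toNat_natCast]
  rw [hL, hR]
  rcases Nat.mod_two_eq_zero_or_one (m + 1) with h | h
  · rw [if_pos h, show (m + 2) / 2 = (m + 1) / 2 by omega]
  · rw [if_neg (by omega)]
    rw [show (m + 2) / 2 = (m + 1) / 2 + 1 by omega, List.range_succ, List.map_append]
    congr 1
    simp only [List.map_cons, List.map_nil, List.cons.injEq, and_true]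
    omega

lemma prod_eq (k : Nat) :
    (PySem.List.pyRange 1 ((k : Int) + 1) 2).foldl (fun acc i => acc * i) 1 = pvOddProd k := by
  induction k with
  | zero => decide
  | succ k ih =>
    rw [show ((k + 1 : Nat) : Int) + 1 = (k : Int) + 1 + 1 by push_cast; ring, range2_step]
    simp only [pvOddProd]
    rcases Nat.mod_two_eq_zero_or_one (k + 1) with h | h
    · simp [h, ih]
    · rw [if_neg (by omega), if_neg (by omega), List.foldl_append, ih]
      simp only [List.foldl]

lemma sumE_closed (m : Nat) : ((m / 2 : Nat) : Int) * ((m / 2 : Nat) + 1) = pvSumE m := by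
  induction m with
  | zero => decide
  | succ m ih =>
    simp only [pvSumE]
    rcases Nat.mod_two_eq_zero_or_one (m + 1) with h | h
    · rw [if_pos h, ← ih]
      obtain ⟨q, rfl⟩ : ∃ q, m = 2 * q + 1 := ⟨m / 2, by omega⟩
      rw [show (2 * q + 1 + 1) / 2 = q + 1 by omega, show (2 * q + 1) / 2 = q by omega]
      push_cast; ring
    · rw [if_neg (by omega), ← ih, show (m + 1) / 2 = m / 2 by omega]

lemma B_eq (m : Nat) : sum_even_product_odd_alt (m : Int) = (pvSumE m, pvOddProd m) := by
  simp only [sum_even_product_odd_alt, pvFdiv, max_eq_right (by positivity : (0:Int) ≤ ((m / 2 : Nat) : Int))]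
  rw [prod_eq, sumE_closed]

lemma neg_case (n : Int) (h : n < 0) : sum_even_product_odd n = sum_even_product_odd_alt n := by
  unfold sum_even_product_odd sum_even_product_odd_alt
  rw [PySem.List.pyRange_one_eq_nil (by omega),
      PySem.List.pyRange_of_pos _ _ (show (0:Int) < 2 by norm_num), if_neg (by omega)]
  simp only [List.range_zero, List.map_nil, List.foldl_nil]
  have hneg : PySem.Int.floordiv n 2 < 0 := by
    simp [PySem.Int.floordiv, Int.fdiv_eq_ediv]; omega
  rw [show max 0 (PySem.Int.floordiv n 2) = 0 by omega]
  norm_num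

-- ===== VERDICT (by name: the statement is the Claim_ definition above) =====
theorem sum_even_product_odd_spec : Claim_equal_sum_even_product_odd := by
  intro n _
  unfold Spec_sum_even_product_odd
  rcases lt_or_ge n 0 with h | h
  · exact neg_case n h
  · obtain ⟨m, rfl⟩ : ∃ m : Nat, n = (m : Int) := ⟨n.toNat, by omega⟩
    rw [A_eq, B_eq]
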